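-- pv_equiv track=rewrite | github.com/cgillam0513/math_trees | math_trees.py | parse_num_str_from_input
-- ===== SOURCE A (Python) =====
-- def parse_num_str_from_input(input_string: str):
--     def create_num_str(input_str, num_str, b_did_see_dec):
--         indx = -1
--         for c in input_str:
--             indx += 1
--             if c.isdigit():
--                 num_str += c
--             elif c == '.':
--                 if b_did_see_dec:
--                     raise SyntaxError
--                 else:
--                     b_did_see_dec = True
--                     num_str += c
--             else:
--                 indx -= 1
--                 break
--
--         return num_str, input_str[indx + 1:]
--
--     p = input_string[0]
--     num_string = ""
--     if '.' == p:
--         num_string += p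
--         num_string, input_string = create_num_str(input_string[1:], num_string, True)
--     elif '+' == p:
--         if input_string[1] in ['+', '-']:
--             raise SyntaxError
--         num_string, input_string = parse_num_str_from_input(input_string[1:])
--     elif '-' == p:
--         if input_string[1] in ['+', '-']:
--             raise SyntaxError
--         num_string, input_string = parse_num_str_from_input(input_string[1:])
--         num_string = '-' + num_string
--     else:
--         num_string, input_string = create_num_str(input_string, num_string, False)
--
--     return num_string, input_string
-- ===== SOURCE B (Python) =====
-- def parse_num_str_from_input(input_string: str):
--     first = input_string[0]  # IndexError on empty, as in A
--     start = 0
--     prefix = ""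
--     if first == '+' or first == '-':
--         if input_string[1] in ('+', '-'):
--             raise SyntaxError
--         start = 1
--         if first == '-':
--             prefix = '-'
--     # scan for the end of the digit/dot run, then validate dots by counting
--     i = start
--     n = len(input_string)
--     while i < n and (input_string[i].isdigit() or input_string[i] == '.'):
--         i += 1
--     body = input_string[start:i]
--     if body.count('.') > 1:
--         raise SyntaxError
--     return prefix + body, input_string[i:]
-- ===== Notes on version B (the rewrite author's own statement) =====
-- stated objective: simpler
-- what changed: Replaces A's recursive sign-dispatch plus stateful helper (seen_dec flag threaded through a char-accumulating loop) with one flat function: handle the sign, scan once for the end index of the digit/dot run, slice it out, and validate the decimal point by counting dots in the slice.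
import Mathlib
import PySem

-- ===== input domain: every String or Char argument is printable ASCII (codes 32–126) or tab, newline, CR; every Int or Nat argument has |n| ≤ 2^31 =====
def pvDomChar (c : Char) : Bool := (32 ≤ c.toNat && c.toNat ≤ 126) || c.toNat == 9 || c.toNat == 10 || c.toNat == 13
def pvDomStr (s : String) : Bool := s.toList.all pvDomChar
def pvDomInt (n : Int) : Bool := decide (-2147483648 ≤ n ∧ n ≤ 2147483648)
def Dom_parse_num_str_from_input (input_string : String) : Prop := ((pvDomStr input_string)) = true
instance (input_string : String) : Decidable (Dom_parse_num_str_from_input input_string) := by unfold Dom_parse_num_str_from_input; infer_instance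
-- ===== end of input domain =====

-- B is a simpler flat decomposition (sign, one scan for the run's end, slice, dot-count check)
-- of A's recursive dispatch with a flag-threading helper; identical values and identical raise set.

-- ===== PORT A =====
-- helper create_num_str: the for-loop with break, accumulating num_str, flag b_did_see_dec;
-- `none` = SyntaxError; on break the remainder starts at the breaking char (indx bookkeeping).
def pvCreateA (input_str : List Char) (num_str : List Char) (b_did_see_dec : Bool) :
    Option (List Char × List Char) :=
  match input_str with
  | [] => some (num_str, [])
  | c :: rest =>
    if c.isDigit then pvCreateA rest (num_str ++ [c]) b_did_see_dec
    else if c = '.' then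
      if b_did_see_dec then none
      else pvCreateA rest (num_str ++ [c]) true
    else some (num_str, c :: rest)

-- A's body on the char list; `none` = IndexError (empty access) or SyntaxError (double sign / dot)
def pvParseA (cs : List Char) : Option (List Char × List Char) :=
  match cs with
  | [] => none                                   -- input_string[0]: IndexError
  | p :: rest =>
    if p = '.' then pvCreateA rest ['.'] true
    else if p = '+' then
      match rest with
      | [] => none                               -- input_string[1]: IndexError
      | q :: _ =>
        if q = '+' ∨ q = '-' then none           -- raise SyntaxError
        else pvParseA rest
    else if p = '-' then
      match rest with
      | [] => none
      | q :: _ =>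
        if q = '+' ∨ q = '-' then none
        else (pvParseA rest).map (fun nr => ('-' :: nr.1, nr.2))
    else pvCreateA (p :: rest) [] false

def parse_num_str_from_input (input_string : String) : String × String :=
  match pvParseA input_string.toList with
  | some (n, r) => (String.ofList n, String.ofList r)
  | none => ("", "")                             -- unreachable under Pre_ (Python raises here)

-- ===== PORT B =====
-- B's while loop: advance i past digits/dots; returned as the (run, rest) split of the list
def pvScanB (cs : List Char) : List Char × List Char :=
  match cs with
  | [] => ([], [])
  | c :: rest =>
    if c.isDigit || c = '.' then
      let pr := pvScanB rest
      (c :: pr.1, pr.2)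
    else ([], c :: rest)

def pvParseB (cs : List Char) : Option (List Char × List Char) :=
  match cs with
  | [] => none                                   -- input_string[0]: IndexError
  | first :: rest =>
    if first = '+' ∨ first = '-' then
      match rest with
      | [] => none                               -- input_string[1]: IndexError
      | q :: _ =>
        if q = '+' ∨ q = '-' then none           -- raise SyntaxError
        else
          let br := pvScanB rest
          if br.1.count '.' > 1 then none        -- raise SyntaxError
          else some ((if first = '-' then ['-'] else []) ++ br.1, br.2)
    else
      let br := pvScanB (first :: rest)
      if br.1.count '.' > 1 then none
      else some (br.1, br.2)

def parse_num_str_from_input_alt (input_string : String) : String × String :=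
  match pvParseB input_string.toList with
  | some (n, r) => (String.ofList n, String.ofList r)
  | none => ("", "")

-- ===== PRECONDITION & SPEC =====
-- Pre_ excludes exactly the inputs where Python A raises: IndexError on an empty string or a
-- lone sign character, SyntaxError on a sign followed by a sign or on a second decimal point
-- inside the leading numeric run; B raises on exactly the same inputs.
def Pre_parse_num_str_from_input (input_string : String) : Prop :=
  input_string.toList ≠ [] ∧
  (if input_string.toList.headD ' ' = '+' ∨ input_string.toList.headD ' ' = '-' then
     input_string.toList.tail ≠ [] ∧
     ¬(input_string.toList.tail.headD ' ' = '+' ∨ input_string.toList.tail.headD ' ' = '-') ∧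
     (input_string.toList.tail.takeWhile (fun d => d.isDigit || d = '.')).count '.' ≤ 1
   else (input_string.toList.takeWhile (fun d => d.isDigit || d = '.')).count '.' ≤ 1)
instance (input_string : String) : Decidable (Pre_parse_num_str_from_input input_string) := by
  unfold Pre_parse_num_str_from_input; infer_instance

def pvWitness_parse_num_str_from_input : String := "-12.5kg"

def Spec_parse_num_str_from_input (input_string : String) (out : String × String) : Prop := out = parse_num_str_from_input_alt input_string
instance (input_string : String) (out : String × String) : Decidable (Spec_parse_num_str_from_input input_string out) := by unfold Spec_parse_num_str_from_input; infer_instance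

-- ===== CLAIM (what is proved, stated in full; the proofs are below) =====
def Claim_equal_parse_num_str_from_input : Prop := ∀ (input_string : String), Dom_parse_num_str_from_input input_string → Pre_parse_num_str_from_input input_string → Spec_parse_num_str_from_input input_string (parse_num_str_from_input input_string)

-- ===== LEMMAS AND PROOFS =====

theorem pvScanB_eq (cs : List Char) :
    pvScanB cs = (cs.takeWhile (fun d => d.isDigit || d = '.'),
                  cs.dropWhile (fun d => d.isDigit || d = '.')) := by
  induction cs with
  | nil => rfl
  | cons c rest ih =>
    simp only [pvScanB, List.takeWhile_cons, List.dropWhile_cons]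
    by_cases h : (c.isDigit || c = '.') = true
    · simp [h, ih]
    · simp [h]

theorem pvCreateA_eq (cs : List Char) :
    ∀ (num : List Char) (b : Bool),
    (cs.takeWhile (fun d => d.isDigit || d = '.')).count '.' + (if b then 1 else 0) ≤ 1 →
    pvCreateA cs num b = some (num ++ cs.takeWhile (fun d => d.isDigit || d = '.'),
                               cs.dropWhile (fun d => d.isDigit || d = '.')) := by
  induction cs with
  | nil => intro num b _; simp [pvCreateA]
  | cons c rest ih =>
    intro num b h
    by_cases hdc : c = '.'
    · subst hdc
      rw [List.takeWhile_cons, if_pos (by decide), List.count_cons] at h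
      simp only [beq_self_eq_true, if_true] at h
      cases b with
      | true => simp at h
      | false =>
        have step : pvCreateA ('.' :: rest) num false = pvCreateA rest (num ++ ['.']) true := by
          rw [pvCreateA.eq_def]
          simp [show ('.' : Char).isDigit = false from by decide]
        rw [step, ih (num ++ ['.']) true (by simp at h ⊢; omega)]
        rw [List.takeWhile_cons, List.dropWhile_cons, if_pos (by decide), if_pos (by decide)]
        simp
    · by_cases hd : c.isDigit = true
      · have hp : (c.isDigit || decide (c = '.')) = true := by simp [hd]
        simp only [List.takeWhile_cons, List.dropWhile_cons] at h ⊢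
        rw [if_pos hp] at h
        rw [List.count_cons] at h
        simp only [hdc, beq_iff_eq] at h
        simp only [pvCreateA]
        rw [if_pos hd]
        rw [ih (num ++ [c]) b (by omega)]
        rw [if_pos hp, if_pos hp]
        simp
      · have hp : ¬ ((c.isDigit || decide (c = '.')) = true) := by simp [hd, hdc]
        simp only [pvCreateA]
        rw [if_neg hd, if_neg hdc]
        rw [List.takeWhile_cons, List.dropWhile_cons, if_neg hp, if_neg hp]
        simp

-- pvParseA on a non-sign-headed nonempty list with a legal dot count equals the scan split
theorem pvParseA_nosign (c : Char) (rest : List Char)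
    (hs : ¬(c = '+' ∨ c = '-'))
    (h : ((c :: rest).takeWhile (fun d => d.isDigit || d = '.')).count '.' ≤ 1) :
    pvParseA (c :: rest) = some ((c :: rest).takeWhile (fun d => d.isDigit || d = '.'),
                                 (c :: rest).dropWhile (fun d => d.isDigit || d = '.')) := by
  have hp : c ≠ '+' := fun e => hs (Or.inl e)
  have hm : c ≠ '-' := fun e => hs (Or.inr e)
  by_cases hdc : c = '.'
  · subst hdc
    rw [List.takeWhile_cons, if_pos (by decide), List.count_cons] at h
    simp only [beq_self_eq_true, if_true] at h
    have step : pvParseA ('.' :: rest) = pvCreateA rest ['.'] true := by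
      rw [pvParseA.eq_def]; simp
    rw [step, pvCreateA_eq rest ['.'] true (by simp at h ⊢; omega)]
    rw [List.takeWhile_cons, List.dropWhile_cons, if_pos (by decide), if_pos (by decide)]
    simp
  · simp only [pvParseA]
    rw [if_neg hdc, if_neg hp, if_neg hm]
    exact pvCreateA_eq (c :: rest) [] false (by simpa using h)

theorem pvParse_eq (cs : List Char) (h1 : cs ≠ [])
    (h2 : if cs.headD ' ' = '+' ∨ cs.headD ' ' = '-' then
            cs.tail ≠ [] ∧ ¬(cs.tail.headD ' ' = '+' ∨ cs.tail.headD ' ' = '-') ∧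
            (cs.tail.takeWhile (fun d => d.isDigit || d = '.')).count '.' ≤ 1
          else (cs.takeWhile (fun d => d.isDigit || d = '.')).count '.' ≤ 1) :
    pvParseA cs = pvParseB cs := by
  cases cs with
  | nil => exact absurd rfl h1
  | cons c rest =>
    simp only [List.headD_cons, List.tail_cons] at h2
    by_cases hs : c = '+' ∨ c = '-'
    · rw [if_pos hs] at h2
      obtain ⟨hne, hq', hcnt⟩ := h2
      cases rest with
      | nil => exact absurd rfl hne
      | cons q tail =>
        simp only [List.headD_cons] at hq'
        have hA : pvParseA (q :: tail) =
            some ((q :: tail).takeWhile (fun d => d.isDigit || d = '.'),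
                  (q :: tail).dropWhile (fun d => d.isDigit || d = '.')) :=
          pvParseA_nosign q tail hq' hcnt
        have hcnt' : ¬(((pvScanB (q :: tail)).1.count '.') > 1) := by
          rw [pvScanB_eq]; simpa using Nat.not_lt.mpr hcnt
        rcases hs with h | h <;> subst h
        · have A1 : pvParseA ('+' :: q :: tail) =
              if q = '+' ∨ q = '-' then none else pvParseA (q :: tail) := by
            rw [pvParseA.eq_def]; simp
          have B1 : pvParseB ('+' :: q :: tail) =
              if q = '+' ∨ q = '-' then none else
                if (pvScanB (q :: tail)).1.count '.' > 1 then none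
                else some ((pvScanB (q :: tail)).1, (pvScanB (q :: tail)).2) := by
            rw [pvParseB.eq_def]; simp
          rw [A1, B1, if_neg hq', if_neg hq', if_neg hcnt', hA, pvScanB_eq]
        · have A1 : pvParseA ('-' :: q :: tail) =
              if q = '+' ∨ q = '-' then none
              else (pvParseA (q :: tail)).map (fun nr => ('-' :: nr.1, nr.2)) := by
            rw [pvParseA.eq_def]; simp
          have B1 : pvParseB ('-' :: q :: tail) =
              if q = '+' ∨ q = '-' then none else
                if (pvScanB (q :: tail)).1.count '.' > 1 then none
                else some ('-' :: (pvScanB (q :: tail)).1, (pvScanB (q :: tail)).2) := by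
            rw [pvParseB.eq_def]; simp
          rw [A1, B1, if_neg hq', if_neg hq', if_neg hcnt', hA, pvScanB_eq]
          simp
    · rw [if_neg hs] at h2
      have hA := pvParseA_nosign c rest hs h2
      have hcnt' : ¬(((pvScanB (c :: rest)).1.count '.') > 1) := by
        rw [pvScanB_eq]; simpa using Nat.not_lt.mpr h2
      rw [hA]
      simp only [pvParseB]
      rw [if_neg hs, if_neg hcnt', pvScanB_eq]

-- ===== VERDICT (by name: the statement is the Claim_ definition above) =====
theorem parse_num_str_from_input_spec : Claim_equal_parse_num_str_from_input := by
  intro s _ hpre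
  obtain ⟨h1, h2⟩ := hpre
  unfold Spec_parse_num_str_from_input
  unfold parse_num_str_from_input parse_num_str_from_input_alt
  rw [pvParse_eq s.toList h1 h2]
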